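-- pv_equiv track=rewrite | github.com/Harshitha935/Loopholes | app.py | _tool_blocks
-- ===== SOURCE A (Python) =====
-- TRACKED_TOOLS = [
--     "read_structure",
--     "read_supporting",
--     "check_structure",
--     "propose_structure",
--     "retrieve",
--     "generate",
--     "chat",
--     "chat_edit",
--     "chat_read",
--     "chat_retrieve",
--     "chat_generate",
--     "chat_read_supporting_docs",
--     "chat_rag_pipeline",
-- ]
--
-- def _tool_blocks(events: list[dict], steps: list[dict]) -> list[str]:
--     seen: list[str] = []
--     for t in TRACKED_TOOLS:
--         if t not in seen:
--             seen.append(t)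
--     for e in events:
--         t = str(e.get("tool", "")).strip()
--         if t and t not in seen:
--             seen.append(t)
--     for s in steps:
--         t = str(s.get("tool_name", "")).strip()
--         if t and t not in seen:
--             seen.append(t)
--     return seen
-- ===== SOURCE B (Python) =====
-- TRACKED_TOOLS = [
--     "read_structure",
--     "read_supporting",
--     "check_structure",
--     "propose_structure",
--     "retrieve",
--     "generate",
--     "chat",
--     "chat_edit",
--     "chat_read",
--     "chat_retrieve",
--     "chat_generate",
--     "chat_read_supporting_docs",
--     "chat_rag_pipeline",
-- ]
--
-- def _tool_blocks(events: list, steps: list) -> list: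
--     # Phase 1: gather all candidate names in order, filtering empties.
--     candidates = list(TRACKED_TOOLS)
--     candidates += [t for t in (str(e.get("tool", "")).strip() for e in events) if t]
--     candidates += [t for t in (str(s.get("tool_name", "")).strip() for s in steps) if t]
--     # Phase 2: one order-preserving dedup pass.
--     return list(dict.fromkeys(candidates))
-- ===== Notes on version B (the rewrite author's own statement) =====
-- stated objective: simpler
-- what changed: B separates a gather phase (one flat candidate list built by comprehensions) from a single final order-preserving dedup (dict.fromkeys), replacing A's three loops each doing an inline linear membership check on the growing result.
import Mathlib
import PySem

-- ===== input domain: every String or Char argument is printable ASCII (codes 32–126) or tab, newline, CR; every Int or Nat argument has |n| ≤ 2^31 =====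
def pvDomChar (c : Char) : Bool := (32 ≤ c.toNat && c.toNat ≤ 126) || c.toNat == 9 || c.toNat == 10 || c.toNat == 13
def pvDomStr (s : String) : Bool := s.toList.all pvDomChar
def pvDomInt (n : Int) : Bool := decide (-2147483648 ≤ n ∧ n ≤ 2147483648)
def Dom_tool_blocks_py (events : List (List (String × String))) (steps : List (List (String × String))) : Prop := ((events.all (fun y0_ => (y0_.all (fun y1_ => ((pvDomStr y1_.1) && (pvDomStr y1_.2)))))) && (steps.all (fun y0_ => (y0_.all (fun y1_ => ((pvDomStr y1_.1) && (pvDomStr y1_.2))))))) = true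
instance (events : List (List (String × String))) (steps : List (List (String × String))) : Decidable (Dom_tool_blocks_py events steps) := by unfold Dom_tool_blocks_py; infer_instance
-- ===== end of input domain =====

-- B gathers one flat candidate list first and deduplicates once at the end ('simpler'
-- decomposition); A interleaves a linear membership check into each of its three loops.

def TRACKED_TOOLS : List String :=
  ["read_structure", "read_supporting", "check_structure", "propose_structure",
   "retrieve", "generate", "chat", "chat_edit", "chat_read", "chat_retrieve",
   "chat_generate", "chat_read_supporting_docs", "chat_rag_pipeline"]

-- ===== PORT A =====
-- str(...) is the identity here: the dict values are strings by the type convention.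
def tool_blocks_py (events : List (List (String × String))) (steps : List (List (String × String))) : List String :=
  let seen : List String :=
    TRACKED_TOOLS.foldl (fun seen t => if t ∉ seen then seen ++ [t] else seen) []
  let seen :=
    events.foldl (fun seen e =>
      let t := PySem.Str.strip ((PySem.Dict.mk e).getD "tool" "")
      if t ≠ "" ∧ t ∉ seen then seen ++ [t] else seen) seen
  steps.foldl (fun seen s =>
      let t := PySem.Str.strip ((PySem.Dict.mk s).getD "tool_name" "")
      if t ≠ "" ∧ t ∉ seen then seen ++ [t] else seen) seen

-- ===== PORT B =====
-- gather phase: the stripped non-empty values of one key over a list of dicts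
def tbGather (key : String) (rows : List (List (String × String))) : List String :=
  (rows.map (fun r => PySem.Str.strip ((PySem.Dict.mk r).getD key ""))).filter (fun t => t ≠ "")

-- list(dict.fromkeys(candidates)) = the distinct elements in first-occurrence order = PySem.Set.ofList
def tool_blocks_py_alt (events : List (List (String × String))) (steps : List (List (String × String))) : List String :=
  PySem.Set.ofList (TRACKED_TOOLS ++ tbGather "tool" events ++ tbGather "tool_name" steps)

-- ===== PRECONDITION & SPEC =====
def Spec_tool_blocks_py (events : List (List (String × String))) (steps : List (List (String × String))) (out : List String) : Prop := out = tool_blocks_py_alt events steps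
instance (events : List (List (String × String))) (steps : List (List (String × String))) (out : List String) : Decidable (Spec_tool_blocks_py events steps out) := by unfold Spec_tool_blocks_py; infer_instance

-- ===== CLAIM (what is proved, stated in full; the proofs are below) =====
def Claim_equal_tool_blocks_py : Prop := ∀ (events : List (List (String × String))) (steps : List (List (String × String))), Dom_tool_blocks_py events steps → Spec_tool_blocks_py events steps (tool_blocks_py events steps)

-- ===== LEMMAS AND PROOFS =====

-- A's plain dedup loop is PySem.Set.update
theorem foldl_dedup_eq_update (xs : List String) (s : List String) :
    xs.foldl (fun seen t => if t ∉ seen then seen ++ [t] else seen) s = PySem.Set.update s xs := by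
  induction xs generalizing s with
  | nil => rfl
  | cons x xs ih =>
      rw [List.foldl_cons, PySem.Set.update_cons]
      by_cases h : x ∈ s
      · rw [if_neg (not_not_intro h), PySem.Set.add_of_mem h, ih]
      · rw [if_pos h, PySem.Set.add_of_not_mem h, ih]

-- A's filtered dedup loop over rows is Set.update with the gathered candidates of that key
theorem foldl_filtered_eq_update (key : String) (rows : List (List (String × String))) (s : List String) :
    rows.foldl (fun seen r =>
      let t := PySem.Str.strip ((PySem.Dict.mk r).getD key "")
      if t ≠ "" ∧ t ∉ seen then seen ++ [t] else seen) s
    = PySem.Set.update s (tbGather key rows) := by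
  induction rows generalizing s with
  | nil => rfl
  | cons r rows ih =>
      simp only [List.foldl_cons, tbGather, List.map_cons, List.filter_cons]
      by_cases ht : PySem.Str.strip ((PySem.Dict.mk r).getD key "") = ""
      · simp [ht, ih, tbGather]
      · by_cases hm : PySem.Str.strip ((PySem.Dict.mk r).getD key "") ∈ s <;>
          simp [ht, hm, ih, tbGather, PySem.Set.update_cons]

-- ===== VERDICT (by name: the statement is the Claim_ definition above) =====
theorem tool_blocks_py_spec : Claim_equal_tool_blocks_py := by
  intro events steps _
  show tool_blocks_py events steps = tool_blocks_py_alt events steps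
  unfold tool_blocks_py tool_blocks_py_alt
  rw [foldl_dedup_eq_update, foldl_filtered_eq_update, foldl_filtered_eq_update,
    ← PySem.Set.update_nil_left, ← PySem.Set.update_append, ← PySem.Set.update_append,
    List.append_assoc]
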